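-- pv_equiv track=rewrite | github.com/Epitech-Tek3/B-AIA-500-STG-5-1-gomoku | ai.py | defenseLine
-- ===== SOURCE A (Python) =====
-- def defenseLine(game, x, y):
--     z = 0
--     t = 0
--     if (x < 0):
--         z = x - x*2
--         x = 0
--     if (x > len(game) - 5):
--         t = x - (len(game) - 5)
--
--     a = 0
--     b = 0
--     count = 0
--     for i in range(x + 4 - t - z, x - 1, -1):
--         if (count == 1 and game[y][i] == 1000):
--             a += 1
--             b = a
--         if (count > 1):
--             if (game[y][i] == 1000 and a != 0):
--                 a += 1
--                 if (b < a):
--                     b = a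
--             else:
--                 a = 0
--         count += 1
--     return b
-- ===== SOURCE B (Python) =====
-- def defenseLine(game, x, y):
--     # staged differently: ascending scan tracking the index of the last non-1000 cell,
--     # then the run length at the top of the window falls out by arithmetic.
--     z = -x if x < 0 else 0
--     if x < 0:
--         x = 0
--     t = x - (len(game) - 5) if x > len(game) - 5 else 0
--     top = x + 4 - t - z - 1
--     last_bad = x - 1
--     for i in range(x, top + 1):
--         if game[y][i] != 1000:
--             last_bad = i
--     return max(top - last_bad, 0)
-- ===== Notes on version B (the rewrite author's own statement) =====
-- stated objective: alternative
-- what changed: Replaces A's descending count/a/b state machine with an ascending scan that records the index of the last non-1000 cell and derives the answer arithmetically as top - last_bad (clamped at 0).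
import Mathlib
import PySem

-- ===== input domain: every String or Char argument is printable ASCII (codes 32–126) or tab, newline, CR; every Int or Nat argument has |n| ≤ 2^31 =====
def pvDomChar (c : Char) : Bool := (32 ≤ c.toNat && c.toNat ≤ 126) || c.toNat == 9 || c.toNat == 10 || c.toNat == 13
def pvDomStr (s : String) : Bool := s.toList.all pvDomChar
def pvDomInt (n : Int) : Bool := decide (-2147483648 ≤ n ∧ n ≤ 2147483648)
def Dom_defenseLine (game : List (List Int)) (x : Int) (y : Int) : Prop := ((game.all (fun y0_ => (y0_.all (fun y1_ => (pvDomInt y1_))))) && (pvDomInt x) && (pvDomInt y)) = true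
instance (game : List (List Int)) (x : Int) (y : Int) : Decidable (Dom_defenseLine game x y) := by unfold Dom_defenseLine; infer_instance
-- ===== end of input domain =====

-- B replaces A's descending count/a/b state machine with an ascending last-non-1000-index scan plus arithmetic (objective: alternative).

-- ===== PORT A =====
-- the row game[y] (Python negative-index semantics); defaults only fire outside Pre_
def pvRowA (game : List (List Int)) (y : Int) : List Int :=
  (PySem.List.pyGet? game y).getD []

-- one iteration of A's for-loop body, state = (a, b, count)
def pvStepA (row : List Int) (st : Int × Int × Int) (i : Int) : Int × Int × Int :=
  let a := st.1
  let b := st.2.1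
  let count := st.2.2
  let cell := PySem.List.pyGetD row i 0
  let ab1 : Int × Int := if count = 1 ∧ cell = 1000 then (a + 1, a + 1) else (a, b)
  let ab2 : Int × Int :=
    if count > 1 then
      (if cell = 1000 ∧ ab1.1 ≠ 0 then
        (ab1.1 + 1, if ab1.2 < ab1.1 + 1 then ab1.1 + 1 else ab1.2)
       else (0, ab1.2))
    else ab1
  (ab2.1, ab2.2, count + 1)

def defenseLine (game : List (List Int)) (x : Int) (y : Int) : Int :=
  let z : Int := if x < 0 then x - x * 2 else 0
  let x1 : Int := if x < 0 then 0 else x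
  let t : Int := if x1 > (game.length : Int) - 5 then x1 - ((game.length : Int) - 5) else 0
  let fin := (PySem.List.pyRange (x1 + 4 - t - z) (x1 - 1) (-1)).foldl
      (pvStepA (pvRowA game y)) (0, 0, 0)
  fin.2.1

-- ===== PORT B =====
-- ascending scan: remember the index of the last non-1000 cell seen
def pvLastBadStep (row : List Int) (acc : Int) (i : Int) : Int :=
  if PySem.List.pyGetD row i 0 ≠ 1000 then i else acc

def defenseLine_alt (game : List (List Int)) (x : Int) (y : Int) : Int :=
  let z : Int := if x < 0 then -x else 0
  let x1 : Int := if x < 0 then 0 else x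
  let t : Int := if x1 > (game.length : Int) - 5 then x1 - ((game.length : Int) - 5) else 0
  let top : Int := x1 + 4 - t - z - 1
  let row := (PySem.List.pyGet? game y).getD []
  let lastBad := (PySem.List.pyRange x1 (top + 1) 1).foldl (pvLastBadStep row) (x1 - 1)
  max (top - lastBad) 0

-- ===== PRECONDITION & SPEC =====
-- Pre_ excludes exactly the inputs on which A raises IndexError: when the loop makes at
-- least two iterations it reads game[y][i] for i from start-1 down to the clamped x, so y
-- must be a valid (Python) row index and start must not exceed that row's length.
def Pre_defenseLine (game : List (List Int)) (x : Int) (y : Int) : Prop :=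
  let x1 : Int := if x < 0 then 0 else x
  let z : Int := if x < 0 then -x else 0
  let t : Int := if x1 > (game.length : Int) - 5 then x1 - ((game.length : Int) - 5) else 0
  let start : Int := x1 + 4 - t - z
  start ≤ x1 ∨
    (PySem.Raise.InRange game.length y ∧
      start ≤ (((PySem.List.pyGet? game y).getD []).length : Int))
instance (game : List (List Int)) (x : Int) (y : Int) : Decidable (Pre_defenseLine game x y) := by
  unfold Pre_defenseLine; infer_instance

def pvWitness_defenseLine : List (List Int) × Int × Int :=
  ([[1000, 1000, 1000, 1000, 1000]], 0, 0)

def Spec_defenseLine (game : List (List Int)) (x : Int) (y : Int) (out : Int) : Prop := out = defenseLine_alt game x y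
instance (game : List (List Int)) (x : Int) (y : Int) (out : Int) : Decidable (Spec_defenseLine game x y out) := by unfold Spec_defenseLine; infer_instance

-- ===== CLAIM (what is proved, stated in full; the proofs are below) =====
def Claim_equal_defenseLine : Prop := ∀ (game : List (List Int)) (x : Int) (y : Int), Dom_defenseLine game x y → Pre_defenseLine game x y → Spec_defenseLine game x y (defenseLine game x y)

-- ===== LEMMAS AND PROOFS =====

-- proof-only intermediate: length of the leading run of 1000-cells along an index list
def pvRunCount (row : List Int) : List Int → Int
  | [] => 0
  | i :: rest => if PySem.List.pyGetD row i 0 = 1000 then 1 + pvRunCount row rest else 0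

-- once a = 0 and count ≥ 2, A's loop never changes b again
lemma pv_fold_dead (row : List Int) (l : List Int) (b c : Int) (hc : 2 ≤ c) :
    (l.foldl (pvStepA row) (0, b, c)).2.1 = b := by
  induction l generalizing c with
  | nil => rfl
  | cons i rest ih =>
    have h1 : ¬ (c = 1) := by omega
    have h2 : c > 1 := by omega
    simp only [List.foldl, pvStepA, h1, h2, false_and, if_false, if_true, ne_eq,
      not_true_eq_false, and_false]
    exact ih (c + 1) (by omega)

-- while the run is alive (a = b = k ≥ 1, count ≥ 2), A's b tracks k + the remaining run
lemma pv_fold_live (row : List Int) (l : List Int) (k c : Int) (hk : 1 ≤ k) (hc : 2 ≤ c) :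
    (l.foldl (pvStepA row) (k, k, c)).2.1 = k + pvRunCount row l := by
  induction l generalizing k c with
  | nil => simp [pvRunCount]
  | cons i rest ih =>
    have h1 : ¬ (c = 1) := by omega
    have h2 : c > 1 := by omega
    by_cases hcell : PySem.List.pyGetD row i 0 = 1000
    · have hk0 : (k : Int) ≠ 0 := by omega
      have hlt : k < k + 1 := by omega
      simp only [List.foldl, pvStepA, h1, h2, hcell, false_and, if_false, if_true, true_and,
        hk0, not_false_eq_true, hlt, ne_eq, pvRunCount]
      rw [ih (k + 1) (c + 1) (by omega) (by omega)]
      ring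
    · simp only [List.foldl, pvStepA, h1, h2, hcell, false_and, if_false, if_true,
      and_false, false_and, pvRunCount]
      rw [pv_fold_dead row rest k (c + 1) (by omega)]
      omega

-- from state (0,0,1) (i.e. after the first, access-free iteration) A's b is the run count
lemma pv_fold_from_one (row : List Int) (l : List Int) :
    (l.foldl (pvStepA row) (0, 0, 1)).2.1 = pvRunCount row l := by
  cases l with
  | nil => rfl
  | cons i rest =>
    by_cases hcell : PySem.List.pyGetD row i 0 = 1000
    · have hstep : pvStepA row (0, 0, 1) i = (1, 1, 2) := by
        simp [pvStepA, hcell]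
      rw [List.foldl_cons, hstep, pv_fold_live row rest 1 2 (by omega) (by omega)]
      simp [pvRunCount, hcell]
    · have hstep : pvStepA row (0, 0, 1) i = (0, 0, 2) := by
        simp [pvStepA, hcell]
      rw [List.foldl_cons, hstep, pv_fold_dead row rest 0 2 (by omega)]
      simp [pvRunCount, hcell]

-- A's whole loop over range(start, lo, -1) is the run count over range(start-1, lo, -1)
lemma pv_A_runCount (row : List Int) (start lo : Int) :
    ((PySem.List.pyRange start lo (-1)).foldl (pvStepA row) (0, 0, 0)).2.1 =
      pvRunCount row (PySem.List.pyRange (start - 1) lo (-1)) := by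
  by_cases h : lo < start
  · rw [PySem.List.pyRange_neg_one_cons h]
    have hstep : pvStepA row (0, 0, 0) start = (0, 0, 1) := by
      simp [pvStepA]
    rw [List.foldl_cons, hstep, pv_fold_from_one]
  · rw [PySem.List.pyRange_neg_one_eq_nil (by omega : start ≤ lo),
        PySem.List.pyRange_neg_one_eq_nil (by omega : start - 1 ≤ lo)]
    rfl

-- B's fold never exceeds its initial bound when all scanned indices are bounded
lemma pv_lastBad_le (row : List Int) (l : List Int) (c M : Int)
    (hc : c ≤ M) (hl : ∀ i ∈ l, i ≤ M) :
    l.foldl (pvLastBadStep row) c ≤ M := by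
  induction l generalizing c with
  | nil => exact hc
  | cons i rest ih =>
    rw [List.foldl_cons]
    refine ih _ ?_ (fun j hj => hl j (List.mem_cons_of_mem _ hj))
    unfold pvLastBadStep
    split
    · exact hl i (List.mem_cons_self)
    · exact hc

-- the descending run count equals top minus B's ascending last-bad index (clamped at 0)
lemma pv_run_eq_lastBad (row : List Int) (n : Nat) :
    ∀ (x top : Int), top + 1 - x ≤ n →
    pvRunCount row (PySem.List.pyRange top (x - 1) (-1)) =
      max (top - (PySem.List.pyRange x (top + 1) 1).foldl (pvLastBadStep row) (x - 1)) 0 := by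
  induction n with
  | zero =>
    intro x top h
    rw [PySem.List.pyRange_neg_one_eq_nil (by omega : top ≤ x - 1),
        PySem.List.pyRange_one_eq_nil (by omega : top + 1 ≤ x)]
    simp [pvRunCount]
    omega
  | succ n ih =>
    intro x top h
    by_cases hx : x ≤ top
    case neg =>
      rw [PySem.List.pyRange_neg_one_eq_nil (by omega : top ≤ x - 1),
          PySem.List.pyRange_one_eq_nil (by omega : top + 1 ≤ x)]
      simp [pvRunCount]
      omega
    rw [PySem.List.pyRange_one_succ_right hx, List.foldl_append]
    rw [PySem.List.pyRange_neg_one_cons (by omega : x - 1 < top)]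
    by_cases hcell : PySem.List.pyGetD row top 0 = 1000
    · have hstep : ∀ c, pvLastBadStep row c top = c := by
        intro c; simp [pvLastBadStep, hcell]
      simp only [List.foldl_cons, List.foldl_nil, hstep]
      rw [pvRunCount]
      rw [if_pos hcell]
      have htop : top - 1 + 1 = top := by omega
      have := ih x (top - 1) (by omega)
      rw [htop] at this
      rw [this]
      have hbound : (PySem.List.pyRange x top 1).foldl (pvLastBadStep row) (x - 1) ≤ top - 1 := by
        refine pv_lastBad_le row _ _ _ (by omega) ?_
        intro i hi
        have := (PySem.List.mem_pyRange_one).mp hi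
        omega
      omega
    · have hstep : ∀ c, pvLastBadStep row c top = top := by
        intro c; simp [pvLastBadStep, hcell]
      simp only [List.foldl_cons, List.foldl_nil, hstep]
      rw [pvRunCount, if_neg hcell]
      omega

-- ===== VERDICT (by name: the statement is the Claim_ definition above) =====
theorem defenseLine_spec : Claim_equal_defenseLine := by
  intro game x y _ _
  unfold Spec_defenseLine defenseLine defenseLine_alt
  have hz : (if x < 0 then x - x * 2 else 0) = (if x < 0 then -x else 0 : Int) := by
    split <;> ring
  rw [hz]
  set row := (PySem.List.pyGet? game y).getD [] with hrow
  show ((PySem.List.pyRange _ _ (-1)).foldl (pvStepA (pvRowA game y)) (0, 0, 0)).2.1 = _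
  rw [show pvRowA game y = row from rfl, pv_A_runCount]
  set x1 : Int := if x < 0 then 0 else x with hx1
  set z : Int := if x < 0 then -x else 0 with hzz
  set t : Int := if x1 > (game.length : Int) - 5 then x1 - ((game.length : Int) - 5) else 0 with ht
  have := pv_run_eq_lastBad row 4 x1 (x1 + 4 - t - z - 1) ?_
  · convert this using 2
  · have hz0 : 0 ≤ z := by rw [hzz]; split <;> omega
    have ht0 : 0 ≤ t := by rw [ht]; split <;> omega
    omega
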